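-- pv_equiv track=rewrite | github.com/mrfranza/WatchNumberGenerator | src/utils/geometry.py | get_clock_numbers
-- ===== SOURCE A (Python) =====
-- from typing import Tuple, List
--
-- def get_clock_numbers(style: str, number_set: str) -> List[str]:
--     """
--     Get list of numbers to display based on style and set.
--
--     Args:
--         style: "decimal" or "roman"
--         number_set: "all" or "cardinals"
--
--     Returns:
--         List of number strings to display
--     """
--     if number_set == "cardinals":
--         positions = [12, 3, 6, 9]
--     else:  # all
--         positions = list(range(1, 13))
--
--     if style == "roman":
--         roman_numerals = {
--             1: "I",
--             2: "II",
--             3: "III",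
--             4: "IV",
--             5: "V",
--             6: "VI",
--             7: "VII",
--             8: "VIII",
--             9: "IX",
--             10: "X",
--             11: "XI",
--             12: "XII",
--         }
--         return [roman_numerals[i] for i in positions]
--     else:  # decimal
--         return [str(i) for i in positions]
-- ===== SOURCE B (Python) =====
-- def _to_roman(n):
--     pairs = [(10, "X"), (9, "IX"), (5, "V"), (4, "IV"), (1, "I")]
--     out = ""
--     for v, s in pairs:
--         while n >= v:
--             out += s
--             n -= v
--     return out
--
--
-- def get_clock_numbers(style, number_set):
--     if number_set == "cardinals":
--         positions = [12, 3, 6, 9]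
--     else:
--         positions = list(range(1, 13))
--     if style == "roman":
--         return [_to_roman(i) for i in positions]
--     return [str(i) for i in positions]
-- ===== Notes on version B (the rewrite author's own statement) =====
-- stated objective: alternative
-- what changed: The roman branch computes each numeral with the standard greedy subtractive conversion over (value,symbol) pairs instead of looking it up in a hardcoded 12-entry dictionary.
import Mathlib
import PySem

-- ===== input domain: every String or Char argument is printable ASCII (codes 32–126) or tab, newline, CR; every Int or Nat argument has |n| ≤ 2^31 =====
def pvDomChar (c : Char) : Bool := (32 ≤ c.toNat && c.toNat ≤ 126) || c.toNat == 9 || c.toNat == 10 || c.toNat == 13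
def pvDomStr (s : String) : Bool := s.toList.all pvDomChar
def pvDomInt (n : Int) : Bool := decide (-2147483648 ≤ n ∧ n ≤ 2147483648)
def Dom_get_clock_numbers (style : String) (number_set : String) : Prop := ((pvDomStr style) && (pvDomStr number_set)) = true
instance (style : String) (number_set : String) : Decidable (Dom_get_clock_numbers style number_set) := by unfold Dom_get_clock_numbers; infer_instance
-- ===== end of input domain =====

-- B replaces A's hardcoded roman-numeral dictionary with the standard greedy subtractive conversion (alternative, same cost).


-- ===== PORT A =====
-- the dict literal roman_numerals
def pvRomanDict : PySem.Dict Int String :=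
  (((((((((((((PySem.Dict.empty).insert 1 "I").insert 2 "II").insert 3 "III").insert 4 "IV").insert 5 "V").insert 6 "VI").insert 7 "VII").insert 8 "VIII").insert 9 "IX").insert 10 "X").insert 11 "XI").insert 12 "XII")

def get_clock_numbers (style : String) (number_set : String) : List String :=
  let positions : List Int :=
    if number_set = "cardinals" then [12, 3, 6, 9]
    else PySem.List.pyRange 1 13 1
  if style = "roman" then
    -- roman_numerals[i]: KeyError is unreachable (positions ⊆ 1..12 = the dict's keys), so getD's default is never used
    positions.map (fun i => (pvRomanDict.get? i).getD "")
  else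
    positions.map (fun i => PySem.Int.toStr i)

-- ===== PORT B =====
-- inner 'while n >= v': fuel = n.toNat+1 bounds the iterations exactly (v ≥ 1 for every pair used)
def pvWhileSub (v : Int) (s : List Char) : Nat → Int → List Char → List Char × Int
  | 0, n, out => (out, n)
  | fuel + 1, n, out => if n ≥ v then pvWhileSub v s fuel (n - v) (out ++ s) else (out, n)

def pvToRomanLoop : List (Int × List Char) → Int → List Char → List Char
  | [], _, out => out
  | (v, s) :: rest, n, out =>
      let (out', n') := pvWhileSub v s (n.toNat + 1) n out
      pvToRomanLoop rest n' out'

def pvToRoman (n : Int) : String :=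
  String.ofList (pvToRomanLoop [(10, ['X']), (9, ['I','X']), (5, ['V']), (4, ['I','V']), (1, ['I'])] n [])

def get_clock_numbers_alt (style : String) (number_set : String) : List String :=
  let positions : List Int :=
    if number_set = "cardinals" then [12, 3, 6, 9]
    else PySem.List.pyRange 1 13 1
  if style = "roman" then positions.map pvToRoman
  else positions.map (fun i => PySem.Int.toStr i)

-- ===== PRECONDITION & SPEC =====
def Spec_get_clock_numbers (style : String) (number_set : String) (out : List String) : Prop := out = get_clock_numbers_alt style number_set
instance (style : String) (number_set : String) (out : List String) : Decidable (Spec_get_clock_numbers style number_set out) := by unfold Spec_get_clock_numbers; infer_instance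

-- ===== CLAIM (what is proved, stated in full; the proofs are below) =====
def Claim_equal_get_clock_numbers : Prop := ∀ (style : String) (number_set : String), Dom_get_clock_numbers style number_set → Spec_get_clock_numbers style number_set (get_clock_numbers style number_set)

-- ===== LEMMAS AND PROOFS =====

-- ===== VERDICT (by name: the statement is the Claim_ definition above) =====
theorem get_clock_numbers_spec : Claim_equal_get_clock_numbers := by
  intro style number_set _
  unfold Spec_get_clock_numbers get_clock_numbers get_clock_numbers_alt
  by_cases hn : number_set = "cardinals" <;> by_cases hs : style = "roman" <;>
    simp only [hn, hs, if_pos, if_false] <;> rfl
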